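-- pv_equiv track=rewrite | github.com/Enzuz-s/Cipher | main.py | number_position
-- ===== SOURCE A (Python) =====
-- from string import ascii_lowercase
--
-- LETTERS = {letter: str(index) for index, letter in enumerate(ascii_lowercase, start=1)}
--
-- def alphabet_position(text):
--     text = text.lower()
--     numbers = [LETTERS[character] for character in text if character in LETTERS]
--     return numbers
--
-- def caesar_me(string, shift):
--     shift_key = shift
--     numbers_list = alphabet_position(string)
--     caesar_numbers = []
--
--     for number in numbers_list:
--         new_num = 0
--         if int(number) + shift_key > 26:
--             new_num = (int(number) + shift_key) - 26
--         else:
--             new_num = int(number) + shift_key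
--         caesar_numbers.append(new_num)
--     return caesar_numbers
--
-- def number_position(string, shift):
--     num_list = caesar_me(string, shift)
--     new_word = []
--     for num in num_list:
--         string_num = str(num)
--         for key, value in LETTERS.items():
--             if string_num == value:
--                 new_word.append(key)
--     caesar_word = ''.join(new_word)
--     return caesar_word
-- ===== SOURCE B (Python) =====
-- def number_position(string, shift):
--     out = []
--     for c in string.lower():
--         if 'a' <= c <= 'z':
--             new = ord(c) - 96 + shift
--             if new > 26:
--                 new -= 26
--             if 1 <= new <= 26:
--                 out.append(chr(new + 96))
--     return ''.join(out)
-- ===== Notes on version B (the rewrite author's own statement) =====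
-- stated objective: simpler
-- what changed: Replaced the three-pass pipeline (letters->number-strings dict, shift with parse, 26-entry reverse scan per number) by one direct pass over the lowered string using ord/chr arithmetic, dropping numbers that leave 1..26 after the single -26 correction.
import Mathlib
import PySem

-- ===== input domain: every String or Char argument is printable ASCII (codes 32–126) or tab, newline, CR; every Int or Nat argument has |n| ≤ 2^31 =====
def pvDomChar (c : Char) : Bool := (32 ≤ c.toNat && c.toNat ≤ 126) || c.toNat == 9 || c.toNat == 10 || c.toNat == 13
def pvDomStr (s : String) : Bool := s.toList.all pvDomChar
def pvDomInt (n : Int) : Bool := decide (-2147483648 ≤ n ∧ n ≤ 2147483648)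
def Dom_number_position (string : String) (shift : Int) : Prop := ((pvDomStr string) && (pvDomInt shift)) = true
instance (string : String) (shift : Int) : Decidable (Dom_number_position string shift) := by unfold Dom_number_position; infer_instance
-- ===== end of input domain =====

-- B: one direct pass over the lowered string with ord/chr arithmetic instead of
-- A's dict of number-strings, parse-and-shift pass and 26-entry reverse scan (simpler).


-- ===== PORT A =====
-- LETTERS = {letter: str(index) for index, letter in enumerate(ascii_lowercase, start=1)}
def pvLETTERS : PySem.Dict String String :=
  (PySem.List.enumerate "abcdefghijklmnopqrstuvwxyz".toList 1).foldl
    (fun d p => d.insert (String.singleton p.2) (PySem.Int.toStr p.1)) PySem.Dict.empty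

def alphabet_position (text : String) : List String :=
  ((PySem.Str.lower text).toList.filter
      (fun c => pvLETTERS.contains (String.singleton c))).map
    (fun c => pvLETTERS.getD (String.singleton c) "")

def caesar_me (string : String) (shift : Int) : List Int :=
  (alphabet_position string).foldl (fun acc number =>
    -- int(number): the dict values are canonical decimal strings, so parsing never fails
    let v := (PySem.Int.ofStr? number).getD 0
    acc ++ [if v + shift > 26 then (v + shift) - 26 else v + shift]) []

def number_position (string : String) (shift : Int) : String :=
  let numList := caesar_me string shift
  let newWord := numList.foldl (fun w num =>
    let stringNum := PySem.Int.toStr num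
    pvLETTERS.items.foldl (fun w2 kv => if stringNum == kv.2 then w2 ++ [kv.1] else w2) w) []
  PySem.Str.join "" newWord

-- ===== PORT B =====
def number_position_alt (string : String) (shift : Int) : String :=
  String.ofList ((PySem.Str.lower string).toList.foldl (fun acc c =>
    if 'a' ≤ c ∧ c ≤ 'z' then
      let n := (c.toNat : Int) - 96 + shift
      let n' := if n > 26 then n - 26 else n
      if 1 ≤ n' ∧ n' ≤ 26 then acc ++ [Char.ofNat ((n' + 96).toNat)] else acc
    else acc) [])

-- ===== PRECONDITION & SPEC =====
def Spec_number_position (string : String) (shift : Int) (out : String) : Prop := out = number_position_alt string shift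
instance (string : String) (shift : Int) (out : String) : Decidable (Spec_number_position string shift out) := by unfold Spec_number_position; infer_instance

-- ===== CLAIM (what is proved, stated in full; the proofs are below) =====
def Claim_equal_number_position : Prop := ∀ (string : String) (shift : Int), Dom_number_position string shift → Spec_number_position string shift (number_position string shift)

-- ===== LEMMAS AND PROOFS =====

-- the per-character contribution both pipelines produce
def pvG (shift : Int) (c : Char) : List Char :=
  if 'a' ≤ c ∧ c ≤ 'z' then
    let n := (c.toNat : Int) - 96 + shift
    let n' := if n > 26 then n - 26 else n
    if 1 ≤ n' ∧ n' ≤ 26 then [Char.ofNat ((n' + 96).toNat)] else []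
  else []

-- decimal-representation facts (str is injective), needed because A matches numbers by string
lemma pv_tdc_acc : ∀ (f n : Nat) (acc : List Char),
    Nat.toDigitsCore 10 f n acc = Nat.toDigitsCore 10 f n [] ++ acc := by
  intro f
  induction f with
  | zero => intro n acc; simp [Nat.toDigitsCore]
  | succ f ih =>
    intro n acc
    simp only [Nat.toDigitsCore]
    by_cases h : n / 10 = 0
    · simp [h]
    · simp only [h, if_false]
      rw [ih (n / 10) (Nat.digitChar (n % 10) :: acc), ih (n / 10) [Nat.digitChar (n % 10)]]
      simp

lemma pv_digit_val (m : Nat) (h : m < 10) : (Nat.digitChar m).toNat - 48 = m := by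
  interval_cases m <;> decide

lemma pv_digitChar_ne (m : Nat) (h : m < 10) : Nat.digitChar m ≠ '-' := by
  interval_cases m <;> decide

lemma pv_dval_core : ∀ f n, n < f →
    (Nat.toDigitsCore 10 f n []).foldl (fun a c => 10 * a + (c.toNat - 48)) 0 = n := by
  intro f
  induction f with
  | zero => intro n h; omega
  | succ f ih =>
    intro n hn
    simp only [Nat.toDigitsCore]
    by_cases h : n / 10 = 0
    · simp only [h, if_true, List.foldl]
      rw [pv_digit_val _ (Nat.mod_lt n (by norm_num))]
      omega
    · simp only [h, if_false]
      rw [pv_tdc_acc, List.foldl_append]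
      rw [ih (n / 10) (by omega)]
      simp only [List.foldl]
      rw [pv_digit_val _ (Nat.mod_lt n (by norm_num))]
      omega

lemma pv_toDigits_inj (a b : Nat) (h : Nat.toDigits 10 a = Nat.toDigits 10 b) : a = b := by
  have ha := pv_dval_core (a + 1) a (Nat.lt_succ_self a)
  have hb := pv_dval_core (b + 1) b (Nat.lt_succ_self b)
  unfold Nat.toDigits at h
  rw [h, hb] at ha
  exact ha.symm

lemma pv_no_minus : ∀ f n, '-' ∉ Nat.toDigitsCore 10 f n [] := by
  intro f
  induction f with
  | zero => intro n; simp [Nat.toDigitsCore]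
  | succ f ih =>
    intro n
    simp only [Nat.toDigitsCore]
    by_cases h : n / 10 = 0
    · simp only [h, if_true, List.mem_singleton]
      exact fun he => pv_digitChar_ne _ (Nat.mod_lt n (by norm_num)) he.symm
    · simp only [h, if_false]
      rw [pv_tdc_acc]
      simp only [List.mem_append, List.mem_singleton]
      rintro (hm | hm)
      · exact ih _ hm
      · exact pv_digitChar_ne _ (Nat.mod_lt n (by norm_num)) hm.symm

lemma pv_toChars_inj (m k : Int) (h : PySem.Int.toChars m = PySem.Int.toChars k) : m = k := by
  unfold PySem.Int.toChars at h
  split_ifs at h with hm hk hk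
  · rw [List.cons.injEq] at h
    have := pv_toDigits_inj _ _ h.2
    omega
  · have hmem : '-' ∈ Nat.toDigits 10 k.toNat := h ▸ List.mem_cons_self
    unfold Nat.toDigits at hmem
    exact absurd hmem (pv_no_minus _ _)
  · have hmem : '-' ∈ Nat.toDigits 10 m.toNat := h ▸ List.mem_cons_self
    unfold Nat.toDigits at hmem
    exact absurd hmem (pv_no_minus _ _)
  · have := pv_toDigits_inj _ _ h
    omega

lemma pv_toStr_inj (m k : Int) (h : PySem.Int.toStr m = PySem.Int.toStr k) : m = k :=
  pv_toChars_inj _ _ (by rw [← PySem.Int.toList_toStr, ← PySem.Int.toList_toStr, h])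

-- the dictionary, computed
lemma pv_items : pvLETTERS.items
    = (List.range 26).map (fun i => (String.singleton (Char.ofNat (97 + i)), PySem.Int.toStr ((i : Int) + 1))) := by
  decide

lemma pv_keys_nodup : pvLETTERS.keys.Nodup := by decide

lemma pv_ofNat97 (i : Nat) (h : i < 26) : (Char.ofNat (97 + i)).toNat = 97 + i := by
  interval_cases i <;> decide

lemma pv_char_eq_iff (c d : Char) : c = d ↔ c.toNat = d.toNat :=
  ⟨fun h => h ▸ rfl, fun h => by rw [← Char.ofNat_toNat c, h, Char.ofNat_toNat]⟩

lemma pv_singleton_inj {c d : Char} : String.singleton c = String.singleton d ↔ c = d := by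
  constructor
  · intro h
    have := congrArg String.toList h
    simpa using this
  · intro h; rw [h]

lemma pv_le_iff (c : Char) : ('a' ≤ c ∧ c ≤ 'z') ↔ (97 ≤ c.toNat ∧ c.toNat ≤ 122) := by
  rw [Char.le_def, Char.le_def, UInt32.le_iff_toNat_le, UInt32.le_iff_toNat_le]
  exact Iff.rfl

lemma pv_contains (c : Char) :
    (pvLETTERS.contains (String.singleton c) = true) ↔ (97 ≤ c.toNat ∧ c.toNat ≤ 122) := by
  rw [PySem.Dict.contains_eq_decide_mem_keys]
  simp only [decide_eq_true_eq]
  have hk : pvLETTERS.keys = (List.range 26).map (fun i => String.singleton (Char.ofNat (97 + i))) := by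
    decide
  rw [hk]
  simp only [List.mem_map, List.mem_range]
  constructor
  · rintro ⟨i, hi, hs⟩
    have hc : Char.ofNat (97 + i) = c := pv_singleton_inj.mp hs
    have := pv_ofNat97 i hi
    rw [pv_char_eq_iff] at hc
    omega
  · rintro ⟨h1, h2⟩
    refine ⟨c.toNat - 97, by omega, ?_⟩
    rw [pv_singleton_inj, pv_char_eq_iff, pv_ofNat97 _ (by omega)]
    omega

lemma pv_getD (c : Char) (h1 : 97 ≤ c.toNat) (h2 : c.toNat ≤ 122) :
    pvLETTERS.getD (String.singleton c) "" = PySem.Int.toStr ((c.toNat : Int) - 96) := by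
  have hm : (String.singleton c, PySem.Int.toStr ((c.toNat : Int) - 96)) ∈ pvLETTERS.items := by
    rw [pv_items]
    refine List.mem_map.mpr ⟨c.toNat - 97, List.mem_range.mpr (by omega), ?_⟩
    have harg : 97 + (c.toNat - 97) = c.toNat := by omega
    refine Prod.ext ?_ ?_
    · show String.singleton (Char.ofNat (97 + (c.toNat - 97))) = String.singleton c
      rw [harg, Char.ofNat_toNat]
    · show PySem.Int.toStr (((c.toNat - 97 : Nat) : Int) + 1) = PySem.Int.toStr ((c.toNat : Int) - 96)
      congr 1
      push_cast [Nat.cast_sub (by omega : 97 ≤ c.toNat)]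
      ring
  exact PySem.Dict.getD_of_mem_items _ hm pv_keys_nodup ""

lemma pv_parse (v : Int) (h1 : 1 ≤ v) (h2 : v ≤ 26) :
    (PySem.Int.ofStr? (PySem.Int.toStr v)).getD 0 = v := by
  interval_cases v <;> decide

-- the inner 26-entry reverse scan of A, characterised
lemma pv_scan (n : Int) (w : List String) :
    pvLETTERS.items.foldl (fun w2 kv => if PySem.Int.toStr n == kv.2 then w2 ++ [kv.1] else w2) w
      = w ++ (if 1 ≤ n ∧ n ≤ 26 then [String.singleton (Char.ofNat ((n + 96).toNat))] else []) := by
  rw [PySem.List.foldl_append_if (fun kv : String × String => PySem.Int.toStr n == kv.2)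
    (fun kv : String × String => kv.1)]
  congr 1
  rw [pv_items, List.filter_map]
  by_cases h : 1 ≤ n ∧ n ≤ 26
  · rw [if_pos h]
    obtain ⟨h1, h2⟩ := h
    interval_cases n <;> decide
  · rw [if_neg h]
    have hnil : List.filter ((fun kv => PySem.Int.toStr n == kv.2) ∘
        (fun i => (String.singleton (Char.ofNat (97 + i)), PySem.Int.toStr ((i : Int) + 1)))) (List.range 26) = [] := by
      refine List.filter_eq_nil_iff.mpr ?_
      intro i hi
      simp only [Function.comp, beq_iff_eq]
      intro he
      have := pv_toStr_inj _ _ he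
      rw [List.mem_range] at hi
      omega
    rw [hnil]
    rfl

lemma pv_join_nil : ∀ xs : List (List Char), PySem.Chars.join [] xs = xs.flatten := by
  intro xs
  induction xs with
  | nil => simp [PySem.Chars.join_nil]
  | cons x t ih =>
    cases t with
    | nil => simp [PySem.Chars.join_singleton]
    | cons y s =>
      rw [PySem.Chars.join_cons_cons]
      simp only [List.flatten_cons]
      rw [ih]
      simp

lemma pv_flatten_flatMap {α β : Type} (l : List α) (F : α → List (List β)) :
    (l.flatMap F).flatten = l.flatMap (fun a => (F a).flatten) := by
  induction l with
  | nil => simp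
  | cons x t ih => simp [ih]

lemma pv_flatMap_filter {α β : Type} (p : α → Bool) (q : α → List β) (l : List α) :
    (l.filter p).flatMap q = l.flatMap (fun a => if p a then q a else []) := by
  induction l with
  | nil => rfl
  | cons x t ih => by_cases h : p x <;> simp [h, ih]

lemma pv_outer (nums : List Int) (w : List String) :
    nums.foldl (fun w num =>
        pvLETTERS.items.foldl (fun w2 kv => if PySem.Int.toStr num == kv.2 then w2 ++ [kv.1] else w2) w) w
      = w ++ nums.flatMap (fun num =>
          if 1 ≤ num ∧ num ≤ 26 then [String.singleton (Char.ofNat ((num + 96).toNat))] else []) := by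
  induction nums generalizing w with
  | nil => simp
  | cons x t ih =>
    simp only [List.foldl_cons, List.flatMap_cons]
    rw [pv_scan, ih, List.append_assoc]

-- A, reduced to a single flatMap over the lowered characters
lemma pv_A (s : String) (shift : Int) :
    (number_position s shift).toList = ((PySem.Str.lower s).toList).flatMap (pvG shift) := by
  simp only [number_position, caesar_me, alphabet_position,
    PySem.List.foldl_append_singleton_eq_map, List.nil_append]
  rw [pv_outer, List.nil_append, PySem.Str.toList_join]
  have hsep : ("" : String).toList = ([] : List Char) := rfl
  rw [hsep, pv_join_nil, List.map_flatMap, pv_flatten_flatMap, List.flatMap_map, List.flatMap_map,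
    pv_flatMap_filter]
  congr 1
  funext c
  by_cases hc : 97 ≤ c.toNat ∧ c.toNat ≤ 122
  · rw [if_pos ((pv_contains c).mpr hc)]
    rw [pv_getD c hc.1 hc.2, pv_parse _ (by omega) (by omega)]
    rw [pvG, if_pos ((pv_le_iff c).mpr hc)]
    by_cases hr : 1 ≤ (if (c.toNat : Int) - 96 + shift > 26 then (c.toNat : Int) - 96 + shift - 26 else (c.toNat : Int) - 96 + shift) ∧
        (if (c.toNat : Int) - 96 + shift > 26 then (c.toNat : Int) - 96 + shift - 26 else (c.toNat : Int) - 96 + shift) ≤ 26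
    · rw [if_pos hr]
      simp only [if_pos hr, List.map_cons, List.map_nil, String.toList_singleton, List.flatten_cons,
        List.flatten_nil, List.append_nil]
    · rw [if_neg hr]
      simp only [if_neg hr, List.map_nil, List.flatten_nil]
  · rw [if_neg (by intro hcon; exact hc ((pv_contains c).mp hcon))]
    rw [pvG, if_neg (fun hab => hc ((pv_le_iff c).mp hab))]

-- B, reduced to the same flatMap
lemma pv_B (s : String) (shift : Int) :
    (number_position_alt s shift).toList = ((PySem.Str.lower s).toList).flatMap (pvG shift) := by
  unfold number_position_alt
  rw [String.toList_ofList]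
  rw [PySem.List.foldl_congr_mem _ _ (fun acc c => acc ++ pvG shift c) []
    (by intro acc c _
        simp only [pvG]
        by_cases h1 : 'a' ≤ c ∧ c ≤ 'z'
        · rw [if_pos h1, if_pos h1]
          split_ifs <;> simp
        · rw [if_neg h1, if_neg h1]; simp)]
  rw [PySem.List.foldl_append_eq_flatMap, List.nil_append]

-- ===== VERDICT (by name: the statement is the Claim_ definition above) =====
theorem number_position_spec : Claim_equal_number_position := by
  unfold Claim_equal_number_position
  intro s shift _
  unfold Spec_number_position
  rw [← String.toList_inj, pv_A, pv_B]
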